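-- pv_equiv track=rewrite | github.com/dunghoangnguyen/VA | NB/01_VN NB UW Datamart.py | categorize_admin_rule
-- ===== SOURCE A (Python) =====
-- def categorize_admin_rule(remark):
--     if remark is None or remark == "":
--         return ""
--
--     remark_lower = remark.lower()
--     if any(phrase in remark_lower for phrase in ["hot location", "blacklist"]):
--         return "Agent - High risk"
--     elif "agent who is client" in remark_lower:
--         return "Agent - Who is client"
--     elif any(phrase in remark_lower for phrase in ["claim", "rating", "exclusion", "reject", "rescind"]):
--         return "Client - Claim/rating/exclusion/rejected/rescind"
--     elif "medical" in remark_lower: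
--         return "Client - Medical check/doc/pending case"
--     elif any(phrase in remark_lower for phrase in ["phone", "email", "address", "birth", "lack information"]):
--         return "Client - Information update required"
--     elif "sign" in remark_lower:
--         return "Client - Signature update required"
--     elif "approval" in remark_lower:
--         return "NB - Exceed approval limit"
--     elif any(phrase in remark_lower for phrase in ["<", "<=", ">", ">=", "less than", "more than", "over", "exceed"]):
--         return "Policy - Exceed limit"
--     elif "restriction code" in remark_lower:
--         return "Policy - Has restriction code"
--     elif "invalid face" in remark_lower:
--         return "Policy - Invalid face amount"
--     elif any(phrase in remark_lower for phrase in ["not allowed", "product", "already existed"]):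
--         return "Policy - Product not allowed"
--     elif "redundant premium" in remark_lower:
--         return "Policy - Redundant premium"
--     elif "underpayment" in remark_lower:
--         return "Policy - Underpayment"
--     elif "sign" in remark_lower:
--         return "Client - Signature required"
--     elif any(phrase in remark_lower for phrase in ["fatca", "pep", "risk occupation", "blacklist"]):
--         return "Client - High risk"
--     elif "check remark" in remark_lower:
--         return "Client - Check remark of Digitexx"
--     elif "alpha check" in remark_lower:
--         return "Client - Alpha check"
--     elif "audio" in remark_lower:
--         return "Client - Fail QC call"
--     elif any(phrase in remark_lower for phrase in ["relative", "insured"]):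
--         return "Client - Check relationship/non-relation"
--     elif "is unsuccess" in remark_lower:
--         return "NB - CAS error"
--     elif any(phrase in remark_lower for phrase in ["back effective date", "back date", "backdate"]):
--         return "Policy - Backdate not allowed"
--     elif "random check" in remark_lower:
--         return "Policy - Random check"
--     elif "online training" in remark_lower:
--         return "Agent - Training required"
--     elif "commission" in remark_lower:
--         return "Agent - Check commission split"
--     elif "insurable" in remark_lower:
--         return "Policy - No insurable interest"
--     else:
--         return "Policy" + remark
-- ===== SOURCE B (Python) =====
-- # B: flat phrase table with priorities + running-min scan, instead of an if/elif chain
-- PHRASES = [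
--     ('hot location', 0),
--     ('blacklist', 0),
--     ('agent who is client', 1),
--     ('claim', 2),
--     ('rating', 2),
--     ('exclusion', 2),
--     ('reject', 2),
--     ('rescind', 2),
--     ('medical', 3),
--     ('phone', 4),
--     ('email', 4),
--     ('address', 4),
--     ('birth', 4),
--     ('lack information', 4),
--     ('sign', 5),
--     ('approval', 6),
--     ('<', 7),
--     ('<=', 7),
--     ('>', 7),
--     ('>=', 7),
--     ('less than', 7),
--     ('more than', 7),
--     ('over', 7),
--     ('exceed', 7),
--     ('restriction code', 8),
--     ('invalid face', 9),
--     ('not allowed', 10),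
--     ('product', 10),
--     ('already existed', 10),
--     ('redundant premium', 11),
--     ('underpayment', 12),
--     ('sign', 13),
--     ('fatca', 14),
--     ('pep', 14),
--     ('risk occupation', 14),
--     ('blacklist', 14),
--     ('check remark', 15),
--     ('alpha check', 16),
--     ('audio', 17),
--     ('relative', 18),
--     ('insured', 18),
--     ('is unsuccess', 19),
--     ('back effective date', 20),
--     ('back date', 20),
--     ('backdate', 20),
--     ('random check', 21),
--     ('online training', 22),
--     ('commission', 23),
--     ('insurable', 24),
-- ]
--
-- CATEGORIES = [
--     'Agent - High risk',
--     'Agent - Who is client',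
--     'Client - Claim/rating/exclusion/rejected/rescind',
--     'Client - Medical check/doc/pending case',
--     'Client - Information update required',
--     'Client - Signature update required',
--     'NB - Exceed approval limit',
--     'Policy - Exceed limit',
--     'Policy - Has restriction code',
--     'Policy - Invalid face amount',
--     'Policy - Product not allowed',
--     'Policy - Redundant premium',
--     'Policy - Underpayment',
--     'Client - Signature required',
--     'Client - High risk',
--     'Client - Check remark of Digitexx',
--     'Client - Alpha check',
--     'Client - Fail QC call',
--     'Client - Check relationship/non-relation',
--     'NB - CAS error',
--     'Policy - Backdate not allowed',
--     'Policy - Random check',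
--     'Agent - Training required',
--     'Agent - Check commission split',
--     'Policy - No insurable interest',
-- ]
--
--
-- def categorize_admin_rule(remark):
--     if remark is None or remark == "":
--         return ""
--     t = remark.lower()
--     best = None
--     for phrase, idx in PHRASES:
--         if phrase in t and (best is None or idx < best):
--             best = idx
--     return CATEGORIES[best] if best is not None else "Policy" + remark
-- ===== Notes on version B (the rewrite author's own statement) =====
-- stated objective: alternative
-- what changed: Replaces the 25-branch if/elif chain with a flat (phrase, priority) table scanned once with a running minimum; the category of the lowest-priority matched phrase is looked up in a category list, instead of ordered rule-by-rule first-match branching.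
import Mathlib
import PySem

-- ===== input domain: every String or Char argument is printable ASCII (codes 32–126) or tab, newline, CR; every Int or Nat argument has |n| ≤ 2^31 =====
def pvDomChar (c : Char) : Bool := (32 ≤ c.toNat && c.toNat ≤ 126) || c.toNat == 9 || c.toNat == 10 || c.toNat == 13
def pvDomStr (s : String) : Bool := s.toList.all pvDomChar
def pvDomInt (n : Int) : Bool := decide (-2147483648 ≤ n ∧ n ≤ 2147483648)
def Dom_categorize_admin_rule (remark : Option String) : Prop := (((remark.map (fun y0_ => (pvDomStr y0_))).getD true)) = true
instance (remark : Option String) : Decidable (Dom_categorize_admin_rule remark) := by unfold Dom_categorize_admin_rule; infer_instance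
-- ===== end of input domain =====

-- B replaces A's 25-branch if/elif chain with a flat phrase→priority table scanned once with a running minimum; the category of the minimum-priority matched phrase is returned (simpler data-driven decomposition, same cost).

-- ===== PORT A =====
def categorize_admin_rule (remark : Option String) : String :=
  match remark with
  | none => ""
  | some r =>
    if r = "" then ""
    else
      let rl := PySem.Str.lower r
      if ["hot location", "blacklist"].any (fun p => PySem.Str.isIn p rl) then "Agent - High risk"
      else if PySem.Str.isIn "agent who is client" rl then "Agent - Who is client"
      else if ["claim", "rating", "exclusion", "reject", "rescind"].any (fun p => PySem.Str.isIn p rl) then "Client - Claim/rating/exclusion/rejected/rescind"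
      else if PySem.Str.isIn "medical" rl then "Client - Medical check/doc/pending case"
      else if ["phone", "email", "address", "birth", "lack information"].any (fun p => PySem.Str.isIn p rl) then "Client - Information update required"
      else if PySem.Str.isIn "sign" rl then "Client - Signature update required"
      else if PySem.Str.isIn "approval" rl then "NB - Exceed approval limit"
      else if ["<", "<=", ">", ">=", "less than", "more than", "over", "exceed"].any (fun p => PySem.Str.isIn p rl) then "Policy - Exceed limit"
      else if PySem.Str.isIn "restriction code" rl then "Policy - Has restriction code"
      else if PySem.Str.isIn "invalid face" rl then "Policy - Invalid face amount"
      else if ["not allowed", "product", "already existed"].any (fun p => PySem.Str.isIn p rl) then "Policy - Product not allowed"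
      else if PySem.Str.isIn "redundant premium" rl then "Policy - Redundant premium"
      else if PySem.Str.isIn "underpayment" rl then "Policy - Underpayment"
      else if PySem.Str.isIn "sign" rl then "Client - Signature required"
      else if ["fatca", "pep", "risk occupation", "blacklist"].any (fun p => PySem.Str.isIn p rl) then "Client - High risk"
      else if PySem.Str.isIn "check remark" rl then "Client - Check remark of Digitexx"
      else if PySem.Str.isIn "alpha check" rl then "Client - Alpha check"
      else if PySem.Str.isIn "audio" rl then "Client - Fail QC call"
      else if ["relative", "insured"].any (fun p => PySem.Str.isIn p rl) then "Client - Check relationship/non-relation"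
      else if PySem.Str.isIn "is unsuccess" rl then "NB - CAS error"
      else if ["back effective date", "back date", "backdate"].any (fun p => PySem.Str.isIn p rl) then "Policy - Backdate not allowed"
      else if PySem.Str.isIn "random check" rl then "Policy - Random check"
      else if PySem.Str.isIn "online training" rl then "Agent - Training required"
      else if PySem.Str.isIn "commission" rl then "Agent - Check commission split"
      else if PySem.Str.isIn "insurable" rl then "Policy - No insurable interest"
      else "Policy" ++ r

-- ===== PORT B =====
-- the flat (phrase, priority) table of Source B (PHRASES)
def pvPhrases : List (String × Nat) := [
  ("hot location", 0),
  ("blacklist", 0),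
  ("agent who is client", 1),
  ("claim", 2),
  ("rating", 2),
  ("exclusion", 2),
  ("reject", 2),
  ("rescind", 2),
  ("medical", 3),
  ("phone", 4),
  ("email", 4),
  ("address", 4),
  ("birth", 4),
  ("lack information", 4),
  ("sign", 5),
  ("approval", 6),
  ("<", 7),
  ("<=", 7),
  (">", 7),
  (">=", 7),
  ("less than", 7),
  ("more than", 7),
  ("over", 7),
  ("exceed", 7),
  ("restriction code", 8),
  ("invalid face", 9),
  ("not allowed", 10),
  ("product", 10),
  ("already existed", 10),
  ("redundant premium", 11),
  ("underpayment", 12),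
  ("sign", 13),
  ("fatca", 14),
  ("pep", 14),
  ("risk occupation", 14),
  ("blacklist", 14),
  ("check remark", 15),
  ("alpha check", 16),
  ("audio", 17),
  ("relative", 18),
  ("insured", 18),
  ("is unsuccess", 19),
  ("back effective date", 20),
  ("back date", 20),
  ("backdate", 20),
  ("random check", 21),
  ("online training", 22),
  ("commission", 23),
  ("insurable", 24)]

-- the category list of Source B (CATEGORIES)
def pvCats : List String := [
  "Agent - High risk",
  "Agent - Who is client",
  "Client - Claim/rating/exclusion/rejected/rescind",
  "Client - Medical check/doc/pending case",
  "Client - Information update required",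
  "Client - Signature update required",
  "NB - Exceed approval limit",
  "Policy - Exceed limit",
  "Policy - Has restriction code",
  "Policy - Invalid face amount",
  "Policy - Product not allowed",
  "Policy - Redundant premium",
  "Policy - Underpayment",
  "Client - Signature required",
  "Client - High risk",
  "Client - Check remark of Digitexx",
  "Client - Alpha check",
  "Client - Fail QC call",
  "Client - Check relationship/non-relation",
  "NB - CAS error",
  "Policy - Backdate not allowed",
  "Policy - Random check",
  "Agent - Training required",
  "Agent - Check commission split",
  "Policy - No insurable interest"]

-- one step of Source B's loop body: `if phrase in t and (best is None or idx < best): best = idx`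
def pvStep (t : String) (best : Option Nat) (pi : String × Nat) : Option Nat :=
  if PySem.Str.isIn pi.1 t && (match best with | none => true | some b => decide (pi.2 < b)) then some pi.2 else best

def categorize_admin_rule_alt (remark : Option String) : String :=
  match remark with
  | none => ""
  | some r =>
    if r = "" then ""
    else
      let t := PySem.Str.lower r
      -- CATEGORIES[best] is always in range (every priority in pvPhrases indexes pvCats), so getD is exact
      match pvPhrases.foldl (pvStep t) none with
      | some i => pvCats.getD i ""
      | none => "Policy" ++ r

-- ===== PRECONDITION & SPEC =====
def Spec_categorize_admin_rule (remark : Option String) (out : String) : Prop := out = categorize_admin_rule_alt remark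
instance (remark : Option String) (out : String) : Decidable (Spec_categorize_admin_rule remark out) := by unfold Spec_categorize_admin_rule; infer_instance

-- ===== CLAIM =====
def Claim_equal_categorize_admin_rule : Prop := ∀ (remark : Option String), Dom_categorize_admin_rule remark → Spec_categorize_admin_rule remark (categorize_admin_rule remark)

-- ===== LEMMAS AND PROOFS =====
-- once the running minimum holds b and every later priority is ≥ b, the fold leaves it unchanged
theorem pvStep_foldl_ge (t : String) : ∀ (l : List (String × Nat)) (b : Nat), (∀ pi ∈ l, b ≤ pi.2) → l.foldl (pvStep t) (some b) = some b := by
  intro l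
  induction l with
  | nil => intro b _; rfl
  | cons hd tl ih =>
    intro b h
    have hb : b ≤ hd.2 := h hd (List.mem_cons_self)
    have h2 : decide (hd.2 < b) = false := by simp; omega
    simp only [List.foldl_cons, pvStep, h2, Bool.and_false]
    exact ih b (fun pi hm => h pi (List.mem_cons_of_mem _ hm))

-- on a priority-sorted table, the running-min fold from None finds the FIRST matching phrase's priority
theorem pvStep_foldl_none (t : String) : ∀ (l : List (String × Nat)), l.Pairwise (fun a b => a.2 ≤ b.2) → l.foldl (pvStep t) none = (l.find? (fun pi => PySem.Str.isIn pi.1 t)).map (·.2) := by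
  intro l
  induction l with
  | nil => intro _; rfl
  | cons hd tl ih =>
    intro hp
    rw [List.pairwise_cons] at hp
    by_cases hin : PySem.Str.isIn hd.1 t = true
    · simp only [List.foldl_cons, pvStep, Bool.true_and, List.find?_cons, hin]
      exact (pvStep_foldl_ge t tl hd.2 hp.1).trans rfl
    · simp only [List.foldl_cons, pvStep, List.find?_cons]
      rw [Bool.not_eq_true] at hin
      simp only [hin, Bool.false_and]
      exact ih hp.2

theorem pvPhrases_sorted : pvPhrases.Pairwise (fun a b => a.2 ≤ b.2) := by decide

theorem pv_core (rl r : String) :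
    (if ["hot location", "blacklist"].any (fun p => PySem.Str.isIn p rl) then "Agent - High risk"
     else if PySem.Str.isIn "agent who is client" rl then "Agent - Who is client"
     else if ["claim", "rating", "exclusion", "reject", "rescind"].any (fun p => PySem.Str.isIn p rl) then "Client - Claim/rating/exclusion/rejected/rescind"
     else if PySem.Str.isIn "medical" rl then "Client - Medical check/doc/pending case"
     else if ["phone", "email", "address", "birth", "lack information"].any (fun p => PySem.Str.isIn p rl) then "Client - Information update required"
     else if PySem.Str.isIn "sign" rl then "Client - Signature update required"
     else if PySem.Str.isIn "approval" rl then "NB - Exceed approval limit"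
     else if ["<", "<=", ">", ">=", "less than", "more than", "over", "exceed"].any (fun p => PySem.Str.isIn p rl) then "Policy - Exceed limit"
     else if PySem.Str.isIn "restriction code" rl then "Policy - Has restriction code"
     else if PySem.Str.isIn "invalid face" rl then "Policy - Invalid face amount"
     else if ["not allowed", "product", "already existed"].any (fun p => PySem.Str.isIn p rl) then "Policy - Product not allowed"
     else if PySem.Str.isIn "redundant premium" rl then "Policy - Redundant premium"
     else if PySem.Str.isIn "underpayment" rl then "Policy - Underpayment"
     else if PySem.Str.isIn "sign" rl then "Client - Signature required"
     else if ["fatca", "pep", "risk occupation", "blacklist"].any (fun p => PySem.Str.isIn p rl) then "Client - High risk"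
     else if PySem.Str.isIn "check remark" rl then "Client - Check remark of Digitexx"
     else if PySem.Str.isIn "alpha check" rl then "Client - Alpha check"
     else if PySem.Str.isIn "audio" rl then "Client - Fail QC call"
     else if ["relative", "insured"].any (fun p => PySem.Str.isIn p rl) then "Client - Check relationship/non-relation"
     else if PySem.Str.isIn "is unsuccess" rl then "NB - CAS error"
     else if ["back effective date", "back date", "backdate"].any (fun p => PySem.Str.isIn p rl) then "Policy - Backdate not allowed"
     else if PySem.Str.isIn "random check" rl then "Policy - Random check"
     else if PySem.Str.isIn "online training" rl then "Agent - Training required"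
     else if PySem.Str.isIn "commission" rl then "Agent - Check commission split"
     else if PySem.Str.isIn "insurable" rl then "Policy - No insurable interest"
     else "Policy" ++ r)
    = (match (pvPhrases.find? (fun pi => PySem.Str.isIn pi.1 rl)).map (·.2) with
       | some i => pvCats.getD i ""
       | none => "Policy" ++ r) := by
    by_cases h0 : PySem.Chars.isIn ['h', 'o', 't', ' ', 'l', 'o', 'c', 'a', 't', 'i', 'o', 'n'] rl.toList = true
    · simp [pvPhrases, pvCats, *]
    by_cases h1 : PySem.Chars.isIn ['b', 'l', 'a', 'c', 'k', 'l', 'i', 's', 't'] rl.toList = true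
    · simp [pvPhrases, pvCats, *]
    by_cases h2 : PySem.Chars.isIn ['a', 'g', 'e', 'n', 't', ' ', 'w', 'h', 'o', ' ', 'i', 's', ' ', 'c', 'l', 'i', 'e', 'n', 't'] rl.toList = true
    · simp [pvPhrases, pvCats, *]
    by_cases h3 : PySem.Chars.isIn ['c', 'l', 'a', 'i', 'm'] rl.toList = true
    · simp [pvPhrases, pvCats, *]
    by_cases h4 : PySem.Chars.isIn ['r', 'a', 't', 'i', 'n', 'g'] rl.toList = true
    · simp [pvPhrases, pvCats, *]
    by_cases h5 : PySem.Chars.isIn ['e', 'x', 'c', 'l', 'u', 's', 'i', 'o', 'n'] rl.toList = true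
    · simp [pvPhrases, pvCats, *]
    by_cases h6 : PySem.Chars.isIn ['r', 'e', 'j', 'e', 'c', 't'] rl.toList = true
    · simp [pvPhrases, pvCats, *]
    by_cases h7 : PySem.Chars.isIn ['r', 'e', 's', 'c', 'i', 'n', 'd'] rl.toList = true
    · simp [pvPhrases, pvCats, *]
    by_cases h8 : PySem.Chars.isIn ['m', 'e', 'd', 'i', 'c', 'a', 'l'] rl.toList = true
    · simp [pvPhrases, pvCats, *]
    by_cases h9 : PySem.Chars.isIn ['p', 'h', 'o', 'n', 'e'] rl.toList = true
    · simp [pvPhrases, pvCats, *]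
    by_cases h10 : PySem.Chars.isIn ['e', 'm', 'a', 'i', 'l'] rl.toList = true
    · simp [pvPhrases, pvCats, *]
    by_cases h11 : PySem.Chars.isIn ['a', 'd', 'd', 'r', 'e', 's', 's'] rl.toList = true
    · simp [pvPhrases, pvCats, *]
    by_cases h12 : PySem.Chars.isIn ['b', 'i', 'r', 't', 'h'] rl.toList = true
    · simp [pvPhrases, pvCats, *]
    by_cases h13 : PySem.Chars.isIn ['l', 'a', 'c', 'k', ' ', 'i', 'n', 'f', 'o', 'r', 'm', 'a', 't', 'i', 'o', 'n'] rl.toList = true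
    · simp [pvPhrases, pvCats, *]
    by_cases h14 : PySem.Chars.isIn ['s', 'i', 'g', 'n'] rl.toList = true
    · simp [pvPhrases, pvCats, *]
    by_cases h15 : PySem.Chars.isIn ['a', 'p', 'p', 'r', 'o', 'v', 'a', 'l'] rl.toList = true
    · simp [pvPhrases, pvCats, *]
    by_cases h16 : PySem.Chars.isIn ['<'] rl.toList = true
    · simp [pvPhrases, pvCats, *]
    by_cases h17 : PySem.Chars.isIn ['<', '='] rl.toList = true
    · simp [pvPhrases, pvCats, *]
    by_cases h18 : PySem.Chars.isIn ['>'] rl.toList = true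
    · simp [pvPhrases, pvCats, *]
    by_cases h19 : PySem.Chars.isIn ['>', '='] rl.toList = true
    · simp [pvPhrases, pvCats, *]
    by_cases h20 : PySem.Chars.isIn ['l', 'e', 's', 's', ' ', 't', 'h', 'a', 'n'] rl.toList = true
    · simp [pvPhrases, pvCats, *]
    by_cases h21 : PySem.Chars.isIn ['m', 'o', 'r', 'e', ' ', 't', 'h', 'a', 'n'] rl.toList = true
    · simp [pvPhrases, pvCats, *]
    by_cases h22 : PySem.Chars.isIn ['o', 'v', 'e', 'r'] rl.toList = true
    · simp [pvPhrases, pvCats, *]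
    by_cases h23 : PySem.Chars.isIn ['e', 'x', 'c', 'e', 'e', 'd'] rl.toList = true
    · simp [pvPhrases, pvCats, *]
    by_cases h24 : PySem.Chars.isIn ['r', 'e', 's', 't', 'r', 'i', 'c', 't', 'i', 'o', 'n', ' ', 'c', 'o', 'd', 'e'] rl.toList = true
    · simp [pvPhrases, pvCats, *]
    by_cases h25 : PySem.Chars.isIn ['i', 'n', 'v', 'a', 'l', 'i', 'd', ' ', 'f', 'a', 'c', 'e'] rl.toList = true
    · simp [pvPhrases, pvCats, *]
    by_cases h26 : PySem.Chars.isIn ['n', 'o', 't', ' ', 'a', 'l', 'l', 'o', 'w', 'e', 'd'] rl.toList = true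
    · simp [pvPhrases, pvCats, *]
    by_cases h27 : PySem.Chars.isIn ['p', 'r', 'o', 'd', 'u', 'c', 't'] rl.toList = true
    · simp [pvPhrases, pvCats, *]
    by_cases h28 : PySem.Chars.isIn ['a', 'l', 'r', 'e', 'a', 'd', 'y', ' ', 'e', 'x', 'i', 's', 't', 'e', 'd'] rl.toList = true
    · simp [pvPhrases, pvCats, *]
    by_cases h29 : PySem.Chars.isIn ['r', 'e', 'd', 'u', 'n', 'd', 'a', 'n', 't', ' ', 'p', 'r', 'e', 'm', 'i', 'u', 'm'] rl.toList = true
    · simp [pvPhrases, pvCats, *]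
    by_cases h30 : PySem.Chars.isIn ['u', 'n', 'd', 'e', 'r', 'p', 'a', 'y', 'm', 'e', 'n', 't'] rl.toList = true
    · simp [pvPhrases, pvCats, *]
    by_cases h31 : PySem.Chars.isIn ['f', 'a', 't', 'c', 'a'] rl.toList = true
    · simp [pvPhrases, pvCats, *]
    by_cases h32 : PySem.Chars.isIn ['p', 'e', 'p'] rl.toList = true
    · simp [pvPhrases, pvCats, *]
    by_cases h33 : PySem.Chars.isIn ['r', 'i', 's', 'k', ' ', 'o', 'c', 'c', 'u', 'p', 'a', 't', 'i', 'o', 'n'] rl.toList = true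
    · simp [pvPhrases, pvCats, *]
    by_cases h34 : PySem.Chars.isIn ['c', 'h', 'e', 'c', 'k', ' ', 'r', 'e', 'm', 'a', 'r', 'k'] rl.toList = true
    · simp [pvPhrases, pvCats, *]
    by_cases h35 : PySem.Chars.isIn ['a', 'l', 'p', 'h', 'a', ' ', 'c', 'h', 'e', 'c', 'k'] rl.toList = true
    · simp [pvPhrases, pvCats, *]
    by_cases h36 : PySem.Chars.isIn ['a', 'u', 'd', 'i', 'o'] rl.toList = true
    · simp [pvPhrases, pvCats, *]
    by_cases h37 : PySem.Chars.isIn ['r', 'e', 'l', 'a', 't', 'i', 'v', 'e'] rl.toList = true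
    · simp [pvPhrases, pvCats, *]
    by_cases h38 : PySem.Chars.isIn ['i', 'n', 's', 'u', 'r', 'e', 'd'] rl.toList = true
    · simp [pvPhrases, pvCats, *]
    by_cases h39 : PySem.Chars.isIn ['i', 's', ' ', 'u', 'n', 's', 'u', 'c', 'c', 'e', 's', 's'] rl.toList = true
    · simp [pvPhrases, pvCats, *]
    by_cases h40 : PySem.Chars.isIn ['b', 'a', 'c', 'k', ' ', 'e', 'f', 'f', 'e', 'c', 't', 'i', 'v', 'e', ' ', 'd', 'a', 't', 'e'] rl.toList = true
    · simp [pvPhrases, pvCats, *]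
    by_cases h41 : PySem.Chars.isIn ['b', 'a', 'c', 'k', ' ', 'd', 'a', 't', 'e'] rl.toList = true
    · simp [pvPhrases, pvCats, *]
    by_cases h42 : PySem.Chars.isIn ['b', 'a', 'c', 'k', 'd', 'a', 't', 'e'] rl.toList = true
    · simp [pvPhrases, pvCats, *]
    by_cases h43 : PySem.Chars.isIn ['r', 'a', 'n', 'd', 'o', 'm', ' ', 'c', 'h', 'e', 'c', 'k'] rl.toList = true
    · simp [pvPhrases, pvCats, *]
    by_cases h44 : PySem.Chars.isIn ['o', 'n', 'l', 'i', 'n', 'e', ' ', 't', 'r', 'a', 'i', 'n', 'i', 'n', 'g'] rl.toList = true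
    · simp [pvPhrases, pvCats, *]
    by_cases h45 : PySem.Chars.isIn ['c', 'o', 'm', 'm', 'i', 's', 's', 'i', 'o', 'n'] rl.toList = true
    · simp [pvPhrases, pvCats, *]
    by_cases h46 : PySem.Chars.isIn ['i', 'n', 's', 'u', 'r', 'a', 'b', 'l', 'e'] rl.toList = true
    · simp [pvPhrases, pvCats, *]
    simp [pvPhrases, *]

-- ===== VERDICT =====
theorem categorize_admin_rule_spec : Claim_equal_categorize_admin_rule := by
  intro remark _
  unfold Spec_categorize_admin_rule
  cases remark with
  | none => rfl
  | some r =>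
    by_cases hr : r = ""
    · simp [categorize_admin_rule, categorize_admin_rule_alt, hr]
    · simp only [categorize_admin_rule, categorize_admin_rule_alt, if_neg hr]
      rw [pvStep_foldl_none (PySem.Str.lower r) pvPhrases pvPhrases_sorted]
      exact pv_core (PySem.Str.lower r) r
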